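-- pv_equiv track=rewrite | github.com/MrinmayeeD/GuardianRoute | backend/app.py | _summarize_incident_severity
-- ===== SOURCE A (Python) =====
-- def _summarize_incident_severity(incidents: list) -> str:
--     """Summarize incident severity distribution."""
--     if not incidents:
--         return "No active incidents"
--
--     severity_counts = {}
--     for inc in incidents:
--         severity = inc.get('severity_label', 'Unknown')
--         severity_counts[severity] = severity_counts.get(severity, 0) + 1
--
--     summary_parts = [f"{count} {severity}" for severity, count in severity_counts.items()]
--     return ", ".join(summary_parts)
-- ===== SOURCE B (Python) =====
-- def _summarize_incident_severity(incidents: list) -> str: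
--     """Summarize incident severity distribution."""
--     if not incidents:
--         return "No active incidents"
--     labels = list(dict.fromkeys(inc.get('severity_label', 'Unknown') for inc in incidents))
--     return ", ".join(
--         f"{sum(1 for inc in incidents if inc.get('severity_label', 'Unknown') == label)} {label}"
--         for label in labels
--     )
-- ===== Notes on version B (the rewrite author's own statement) =====
-- stated objective: alternative
-- what changed: Replaced the single-pass dict accumulation of counts by first deduplicating the severity labels in first-appearance order and then counting each label with a separate scan of the incidents.
import Mathlib
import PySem

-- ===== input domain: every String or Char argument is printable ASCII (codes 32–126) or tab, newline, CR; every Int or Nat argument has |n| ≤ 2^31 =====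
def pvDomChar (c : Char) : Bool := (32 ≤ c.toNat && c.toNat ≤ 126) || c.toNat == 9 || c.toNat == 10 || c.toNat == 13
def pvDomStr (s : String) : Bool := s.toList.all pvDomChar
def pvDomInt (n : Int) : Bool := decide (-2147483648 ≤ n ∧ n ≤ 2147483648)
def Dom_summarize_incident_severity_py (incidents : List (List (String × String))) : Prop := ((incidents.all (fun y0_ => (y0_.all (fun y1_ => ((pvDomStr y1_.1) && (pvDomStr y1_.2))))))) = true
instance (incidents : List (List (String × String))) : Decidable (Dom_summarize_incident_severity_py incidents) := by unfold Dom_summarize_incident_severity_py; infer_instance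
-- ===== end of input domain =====

-- B: builds the ordered distinct-label list first, then counts each label by a separate scan (alternative decomposition, same results).
-- ===== PORT A =====
def summarize_incident_severity_py (incidents : List (List (String × String))) : String :=
  if incidents = [] then "No active incidents"
  else
    let severity_counts := incidents.foldl (fun d inc =>
      let severity := (PySem.Dict.ofList inc).getD "severity_label" "Unknown"
      d.insert severity (d.getD severity 0 + 1)) (PySem.Dict.empty : PySem.Dict String Int)
    PySem.Str.join ", " (severity_counts.items.map (fun p => PySem.Int.toStr p.2 ++ " " ++ p.1))

-- ===== PORT B =====
def summarize_incident_severity_py_alt (incidents : List (List (String × String))) : String :=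
  if incidents = [] then "No active incidents"
  else
    let labels := PySem.List.dedup (incidents.map (fun inc => (PySem.Dict.ofList inc).getD "severity_label" "Unknown"))
    PySem.Str.join ", " (labels.map (fun label =>
      PySem.Int.toStr ((incidents.countP (fun inc => (PySem.Dict.ofList inc).getD "severity_label" "Unknown" == label) : Nat) : Int) ++ " " ++ label))

-- ===== PRECONDITION & SPEC =====
def Spec_summarize_incident_severity_py (incidents : List (List (String × String))) (out : String) : Prop := out = summarize_incident_severity_py_alt incidents
instance (incidents : List (List (String × String))) (out : String) : Decidable (Spec_summarize_incident_severity_py incidents out) := by unfold Spec_summarize_incident_severity_py; infer_instance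

-- ===== CLAIM (what is proved, stated in full; the proofs are below) =====
def Claim_equal_summarize_incident_severity_py : Prop := ∀ (incidents : List (List (String × String))), Dom_summarize_incident_severity_py incidents → Spec_summarize_incident_severity_py incidents (summarize_incident_severity_py incidents)

-- ===== LEMMAS AND PROOFS =====

-- ===== VERDICT (by name: the statement is the Claim_ definition above) =====
theorem summarize_incident_severity_py_spec : Claim_equal_summarize_incident_severity_py := by
  intro incidents _
  unfold Spec_summarize_incident_severity_py summarize_incident_severity_py summarize_incident_severity_py_alt
  split
  · rfl
  · have h : incidents.foldl (fun d inc =>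
        d.insert ((PySem.Dict.ofList inc).getD "severity_label" "Unknown")
          (d.getD ((PySem.Dict.ofList inc).getD "severity_label" "Unknown") 0 + 1))
        (PySem.Dict.empty : PySem.Dict String Int)
      = PySem.Dict.counter (incidents.map (fun inc => (PySem.Dict.ofList inc).getD "severity_label" "Unknown")) := by
      rw [← PySem.Dict.foldl_insert_getD_add_one_eq_counter, List.foldl_map]
    rw [h]
    simp only [PySem.Dict.items_counter, List.map_map, PySem.List.dedup_eq_ofList]
    apply congrArg
    apply List.map_congr_left
    intro k _
    simp [Function.comp, List.count, List.countP_map, BEq.comm, Function.comp_def]
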